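-- pv_equiv track=rewrite | github.com/Tunduonn121/Course-Recommendation-System | data_loader.py | build_course_tree
-- ===== SOURCE A (Python) =====
-- def build_course_tree(flat_courses_list):
--     """
--     Hàm này nhận vào một danh sách phẳng các khóa học
--     và gom nhóm chúng lại thành cấu trúc Cây (Dictionary lồng nhau).
--     """
--     course_tree = {} # Khởi tạo Cây rỗng (Root Node)
--
--     for course in flat_courses_list:
--         # Lấy thông tin danh mục của khóa học hiện tại
--         cat = course['category']       # Ví dụ: "Backend", "DevOps"
--         subcat = course['subcategory'] # Ví dụ: "Java", "Python"
--
--         # 1. Nếu Danh mục lớn (Category) chưa có trong Cây -> Tạo mới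
--         if cat not in course_tree:
--             course_tree[cat] = {}
--
--         # 2. Nếu Danh mục con (Subcategory) chưa có trong Danh mục lớn -> Tạo mới dạng List (Nút Lá)
--         if subcat not in course_tree[cat]:
--             course_tree[cat][subcat] = []
--
--         # 3. Thêm khóa học vào đúng vị trí Nút Lá (Leaf Node)
--         course_tree[cat][subcat].append(course)
--
--     return course_tree
-- ===== SOURCE B (Python) =====
-- def build_course_tree(flat_courses_list):
--     # Group by filtering: distinct categories in first-appearance order, then
--     # for each category the distinct subcategories, each with its filtered courses.
--     cats = list(dict.fromkeys(c['category'] for c in flat_courses_list))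
--     tree = {}
--     for cat in cats:
--         in_cat = [c for c in flat_courses_list if c['category'] == cat]
--         subs = list(dict.fromkeys(c['subcategory'] for c in in_cat))
--         tree[cat] = {s: [c for c in in_cat if c['subcategory'] == s] for s in subs}
--     return tree
-- ===== Notes on version B (the rewrite author's own statement) =====
-- stated objective: alternative
-- what changed: B replaces A's single pass that mutates a nested dict with group-by-filtering: ordered dedup of categories, then for each category a filter pass and an ordered dedup of its subcategories, each leaf list obtained by filtering; stable filtering reproduces A's key and course order exactly.
import Mathlib
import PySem

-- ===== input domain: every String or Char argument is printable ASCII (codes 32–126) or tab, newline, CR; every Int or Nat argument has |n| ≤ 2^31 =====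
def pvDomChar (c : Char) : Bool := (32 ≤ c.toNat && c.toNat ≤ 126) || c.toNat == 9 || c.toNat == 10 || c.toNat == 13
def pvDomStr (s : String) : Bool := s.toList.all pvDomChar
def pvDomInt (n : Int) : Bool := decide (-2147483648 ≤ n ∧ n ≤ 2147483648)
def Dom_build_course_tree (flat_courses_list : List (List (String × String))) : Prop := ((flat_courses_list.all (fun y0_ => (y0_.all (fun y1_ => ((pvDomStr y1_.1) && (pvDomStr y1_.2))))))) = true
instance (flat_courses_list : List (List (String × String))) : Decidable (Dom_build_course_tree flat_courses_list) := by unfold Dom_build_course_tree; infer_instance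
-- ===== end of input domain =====

-- B groups by filtering (ordered-dedup of categories, then per-category filters) instead of A's
-- single pass mutating a nested dict; objective: alternative (same result, different algorithm).

-- course['k'] : first-match lookup in the course's assoc list (total form; Pre_ guarantees the key is present)
def pvLook (course : List (String × String)) (k : String) : String :=
  (PySem.Dict.mk course).getD k ""

-- ===== PORT A =====
def build_course_tree (flat_courses_list : List (List (String × String))) : List (String × List (String × List (List (String × String)))) :=
  let tree := flat_courses_list.foldl (fun tree course =>
    let cat := pvLook course "category"
    let subcat := pvLook course "subcategory"
    -- if cat not in course_tree: course_tree[cat] = {}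
    let tree := if tree.contains cat then tree else tree.insert cat PySem.Dict.empty
    -- if subcat not in course_tree[cat]: course_tree[cat][subcat] = []
    let inner := tree.getD cat PySem.Dict.empty
    let inner := if inner.contains subcat then inner else inner.insert subcat ([] : List (List (String × String)))
    -- course_tree[cat][subcat].append(course)  (in-place append: write the updated inner dict back)
    let inner := inner.insert subcat (inner.getD subcat [] ++ [course])
    tree.insert cat inner) PySem.Dict.empty
  tree.items.map (fun p => (p.1, p.2.items))

-- ===== PORT B =====
def build_course_tree_alt (flat_courses_list : List (List (String × String))) : List (String × List (String × List (List (String × String)))) :=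
  let cats := PySem.List.dedup (flat_courses_list.map (fun c => pvLook c "category"))
  cats.map (fun cat =>
    let inCat := flat_courses_list.filter (fun c => pvLook c "category" == cat)
    let subs := PySem.List.dedup (inCat.map (fun c => pvLook c "subcategory"))
    (cat, subs.map (fun s => (s, inCat.filter (fun c => pvLook c "subcategory" == s)))))

-- ===== PRECONDITION & SPEC =====
-- Pre_ excludes exactly the inputs on which Python A raises KeyError: a course dict
-- missing the 'category' or 'subcategory' key (B raises there too).
def Pre_build_course_tree (flat_courses_list : List (List (String × String))) : Prop :=
  ∀ c ∈ flat_courses_list,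
    (PySem.Dict.mk c).contains "category" = true ∧ (PySem.Dict.mk c).contains "subcategory" = true
instance (flat_courses_list : List (List (String × String))) : Decidable (Pre_build_course_tree flat_courses_list) := by
  unfold Pre_build_course_tree; infer_instance

def pvWitness_build_course_tree : (List (List (String × String))) :=
  [[("category", "Backend"), ("subcategory", "Java"), ("title", "Java 101")],
   [("category", "Backend"), ("subcategory", "Python"), ("title", "Py 1")],
   [("category", "DevOps"), ("subcategory", "Docker"), ("title", "D 1")],
   [("category", "Backend"), ("subcategory", "Java"), ("title", "Java 201")]]

def Spec_build_course_tree (flat_courses_list : List (List (String × String))) (out : List (String × List (String × List (List (String × String))))) : Prop := out = build_course_tree_alt flat_courses_list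
instance (flat_courses_list : List (List (String × String))) (out : List (String × List (String × List (List (String × String))))) : Decidable (Spec_build_course_tree flat_courses_list out) := by
  unfold Spec_build_course_tree
  haveI : DecidableEq (String × List (List (String × String))) := inferInstance
  haveI : DecidableEq (String × List (String × List (List (String × String)))) := inferInstance
  infer_instance

-- ===== CLAIM (what is proved, stated in full; the proofs are below) =====
def Claim_equal_build_course_tree : Prop := ∀ (flat_courses_list : List (List (String × String))), Dom_build_course_tree flat_courses_list → Pre_build_course_tree flat_courses_list → Spec_build_course_tree flat_courses_list (build_course_tree flat_courses_list)

-- ===== LEMMAS AND PROOFS =====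

-- canonical grouped form of a list under a key function (B's inner dict, as an items list)
def canon {α : Type} (f : α → String) (m : List α) : List (String × List α) :=
  (PySem.Set.ofList (m.map f)).map (fun s => (s, m.filter (fun x => f x == s)))

-- the nested dict after A's loop, in canonical form (g = outer key, f = inner key)
def outer {α : Type} (g f : α → String) (l : List α) : List (String × PySem.Dict String (List α)) :=
  (PySem.Set.ofList (l.map g)).map
    (fun c => (c, PySem.Dict.mk (canon f (l.filter (fun x => g x == c)))))

lemma keys_mk_canon {α : Type} (f : α → String) (m : List α) :
    (PySem.Dict.mk (canon f m)).keys = PySem.Set.ofList (m.map f) := by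
  simp [canon, PySem.Dict.keys, Function.comp_def]

lemma nodup_keys_mk_canon {α : Type} (f : α → String) (m : List α) :
    (PySem.Dict.mk (canon f m)).keys.Nodup := by
  rw [keys_mk_canon]; exact PySem.Set.nodup_ofList _

lemma ofList_append_mem {α : Type} (f : α → String) (m : List α) (a : α)
    (h : f a ∈ m.map f) :
    PySem.Set.ofList ((m ++ [a]).map f) = PySem.Set.ofList (m.map f) := by
  rw [List.map_append, PySem.Set.ofList_append]
  simp [PySem.Set.update, PySem.Set.add]
  obtain ⟨x, hx, hfx⟩ := List.mem_map.1 h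
  exact ⟨x, hx, hfx⟩

lemma ofList_append_not_mem {α : Type} (f : α → String) (m : List α) (a : α)
    (h : f a ∉ m.map f) :
    PySem.Set.ofList ((m ++ [a]).map f) = PySem.Set.ofList (m.map f) ++ [f a] := by
  rw [List.map_append, PySem.Set.ofList_append]
  simp [PySem.Set.update, PySem.Set.add]
  intro x hx hfx
  exact h (List.mem_map.2 ⟨x, hx, hfx⟩)

lemma canon_append_mem {α : Type} (f : α → String) (m : List α) (a : α)
    (h : f a ∈ m.map f) :
    canon f (m ++ [a]) =
      (canon f m).map (fun p => if p.1 == f a then (p.1, p.2 ++ [a]) else p) := by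
  unfold canon
  rw [ofList_append_mem f m a h, List.map_map]
  apply List.map_congr_left
  intro s _
  by_cases hs : s = f a
  · simp [hs, List.filter_append]
  · simp [List.filter_append, hs, Ne.symm hs]

lemma filter_key_nil {α : Type} (f : α → String) (m : List α) (a : α)
    (h : f a ∉ m.map f) : m.filter (fun x => f x == f a) = [] := by
  rw [List.filter_eq_nil_iff]
  intro x hx hfx
  exact h (List.mem_map.2 ⟨x, hx, by simpa using hfx⟩)

lemma canon_append_not_mem {α : Type} (f : α → String) (m : List α) (a : α)
    (h : f a ∉ m.map f) :
    canon f (m ++ [a]) = canon f m ++ [(f a, [a])] := by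
  unfold canon
  rw [ofList_append_not_mem f m a h, List.map_append]
  congr 1
  · apply List.map_congr_left
    intro s hs
    have hne : s ≠ f a := by
      intro e; exact h (by simpa [e] using (PySem.Set.mem_ofList _ _).1 hs)
    simp [List.filter_append, Ne.symm hne]
  · simp [List.filter_append, filter_key_nil f m a h]

lemma getD_mk_canon {α : Type} (f : α → String) (m : List α) (k : String)
    (h : k ∈ m.map f) :
    (PySem.Dict.mk (canon f m)).getD k [] = m.filter (fun x => f x == k) := by
  apply PySem.Dict.getD_of_mem_items
  · exact List.mem_map.2 ⟨k, (PySem.Set.mem_ofList _ _).2 h, rfl⟩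
  · exact nodup_keys_mk_canon f m

-- one inner-dict step of A's loop, on a dict in canonical form
lemma inner_step {α : Type} (f : α → String) (m : List α) (a : α) :
    (let d := PySem.Dict.mk (canon f m)
     let d1 := if d.contains (f a) then d else d.insert (f a) ([] : List α)
     d1.insert (f a) (d1.getD (f a) [] ++ [a]))
    = PySem.Dict.mk (canon f (m ++ [a])) := by
  by_cases h : f a ∈ m.map f
  · have hc : (PySem.Dict.mk (canon f m)).contains (f a) = true :=
      (PySem.Dict.contains_iff_mem_keys _ _).2
        (by rw [keys_mk_canon]; exact (PySem.Set.mem_ofList _ _).2 h)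
    dsimp only
    rw [hc]
    simp only [if_true]
    rw [getD_mk_canon f m _ h]
    apply PySem.Dict.ext
    rw [PySem.Dict.items_insert, hc]
    simp only [if_true]
    show (canon f m).map _ = canon f (m ++ [a])
    rw [canon_append_mem f m a h]
    apply List.map_congr_left
    intro p hp
    obtain ⟨s, hs, rfl⟩ := List.mem_map.1 hp
    by_cases hsa : s = f a
    · simp [hsa]
    · simp [hsa]
  · have hc : (PySem.Dict.mk (canon f m)).contains (f a) = false := by
      rw [← Bool.not_eq_true]
      intro hcc
      exact h ((PySem.Set.mem_ofList _ _).1 (by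
        have := (PySem.Dict.contains_iff_mem_keys _ _).1 hcc
        rwa [keys_mk_canon] at this))
    dsimp only
    rw [hc]
    simp only [Bool.false_eq_true, if_false]
    rw [PySem.Dict.getD_insert_self, PySem.Dict.insert_insert_self]
    apply PySem.Dict.ext
    rw [PySem.Dict.items_insert, hc]
    simp only [Bool.false_eq_true, if_false]
    show canon f m ++ [(f a, [] ++ [a])] = canon f (m ++ [a])
    rw [canon_append_not_mem f m a h]
    simp

-- inner_step with the two lets written out (the shape rw meets inside fold_outer)
lemma inner_step' {α : Type} (f : α → String) (m : List α) (a : α) :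
    ((if (PySem.Dict.mk (canon f m)).contains (f a) then PySem.Dict.mk (canon f m)
       else (PySem.Dict.mk (canon f m)).insert (f a) ([] : List α)).insert (f a)
      ((if (PySem.Dict.mk (canon f m)).contains (f a) then PySem.Dict.mk (canon f m)
        else (PySem.Dict.mk (canon f m)).insert (f a) ([] : List α)).getD (f a) [] ++ [a]))
    = PySem.Dict.mk (canon f (m ++ [a])) := inner_step f m a

lemma keys_mk_outer {α : Type} (g f : α → String) (l : List α) :
    (PySem.Dict.mk (outer g f l)).keys = PySem.Set.ofList (l.map g) := by
  simp [outer, PySem.Dict.keys, Function.comp_def]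

lemma nodup_keys_mk_outer {α : Type} (g f : α → String) (l : List α) :
    (PySem.Dict.mk (outer g f l)).keys.Nodup := by
  rw [keys_mk_outer]; exact PySem.Set.nodup_ofList _

lemma getD_mk_outer {α : Type} (g f : α → String) (l : List α) (k : String)
    (h : k ∈ l.map g) :
    (PySem.Dict.mk (outer g f l)).getD k PySem.Dict.empty
      = PySem.Dict.mk (canon f (l.filter (fun x => g x == k))) := by
  apply PySem.Dict.getD_of_mem_items
  · exact List.mem_map.2 ⟨k, (PySem.Set.mem_ofList _ _).2 h, rfl⟩
  · exact nodup_keys_mk_outer g f l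

-- A's accumulator stays in canonical nested form
lemma fold_outer {α : Type} (g f : α → String) (l : List α) :
    l.foldl (fun tree a =>
      let tree := if tree.contains (g a) then tree else tree.insert (g a) PySem.Dict.empty
      let inner := tree.getD (g a) PySem.Dict.empty
      let inner := if inner.contains (f a) then inner else inner.insert (f a) ([] : List α)
      let inner := inner.insert (f a) (inner.getD (f a) [] ++ [a])
      tree.insert (g a) inner) PySem.Dict.empty
    = PySem.Dict.mk (outer g f l) := by
  induction l using List.reverseRecOn with
  | nil => rfl
  | append_singleton l a ih =>
    rw [List.foldl_append, ih]
    simp only [List.foldl_cons, List.foldl_nil]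
    by_cases h : g a ∈ l.map g
    · have hc : (PySem.Dict.mk (outer g f l)).contains (g a) = true :=
        (PySem.Dict.contains_iff_mem_keys _ _).2
          (by rw [keys_mk_outer]; exact (PySem.Set.mem_ofList _ _).2 h)
      rw [hc]
      simp only [if_true]
      rw [getD_mk_outer g f l _ h]
      have hfil : (l ++ [a]).filter (fun x => g x == g a) = l.filter (fun x => g x == g a) ++ [a] := by
        simp [List.filter_append]
      rw [inner_step' f (l.filter (fun x => g x == g a)) a, ← hfil]
      apply PySem.Dict.ext
      rw [PySem.Dict.items_insert, hc]
      simp only [if_true]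
      show (outer g f l).map _ = outer g f (l ++ [a])
      unfold outer
      rw [ofList_append_mem g l a h, List.map_map]
      apply List.map_congr_left
      intro c _
      by_cases hca : c = g a
      · simp only [Function.comp_apply, hca, beq_self_eq_true, if_true]
      · have : (l ++ [a]).filter (fun x => g x == c) = l.filter (fun x => g x == c) := by
          simp [List.filter_append, Ne.symm hca]
        simp only [Function.comp_apply, this]
        simp [hca]
    · have hc : (PySem.Dict.mk (outer g f l)).contains (g a) = false := by
        rw [← Bool.not_eq_true]
        intro hcc
        exact h ((PySem.Set.mem_ofList _ _).1 (by
          have := (PySem.Dict.contains_iff_mem_keys _ _).1 hcc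
          rwa [keys_mk_outer] at this))
      rw [hc]
      simp only [Bool.false_eq_true, if_false]
      rw [PySem.Dict.getD_insert_self]
      show ((PySem.Dict.mk (outer g f l)).insert (g a) PySem.Dict.empty).insert (g a) _ = _
      rw [PySem.Dict.insert_insert_self]
      have hin := inner_step' f ([] : List α) a
      rw [show (PySem.Dict.empty : PySem.Dict String (List α)) = PySem.Dict.mk (canon f ([] : List α)) from rfl]
      rw [hin]
      apply PySem.Dict.ext
      rw [PySem.Dict.items_insert, hc]
      simp only [Bool.false_eq_true, if_false]
      show outer g f l ++ [(g a, _)] = outer g f (l ++ [a])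
      unfold outer
      rw [ofList_append_not_mem g l a h, List.map_append]
      congr 1
      · apply List.map_congr_left
        intro c hs
        have hne : c ≠ g a := by
          intro e; exact h (by simpa [e] using (PySem.Set.mem_ofList _ _).1 hs)
        have : (l ++ [a]).filter (fun x => g x == c) = l.filter (fun x => g x == c) := by
          simp [List.filter_append, Ne.symm hne]
        simp [this]
      · simp [List.filter_append, filter_key_nil g l a h]

-- fold_outer, stated in the exact shape of A's port (accepted up to beta/zeta)
lemma fold_canon (l : List (List (String × String))) :
    l.foldl (fun tree course =>
      let cat := pvLook course "category"
      let subcat := pvLook course "subcategory"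
      let tree := if tree.contains cat then tree else tree.insert cat PySem.Dict.empty
      let inner := tree.getD cat PySem.Dict.empty
      let inner := if inner.contains subcat then inner else inner.insert subcat ([] : List (List (String × String)))
      let inner := inner.insert subcat (inner.getD subcat [] ++ [course])
      tree.insert cat inner) PySem.Dict.empty
    = PySem.Dict.mk (outer (fun c => pvLook c "category") (fun c => pvLook c "subcategory") l) :=
  fold_outer (fun c => pvLook c "category") (fun c => pvLook c "subcategory") l

-- ===== VERDICT (by name: the statement is the Claim_ definition above) =====
theorem build_course_tree_spec : Claim_equal_build_course_tree := by
  intro l _ _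
  unfold Spec_build_course_tree build_course_tree build_course_tree_alt
  rw [fold_canon]
  simp [outer, canon]
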